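-- pv_equiv track=rewrite | github.com/ManoharDharel/hackinscience | selectStudents.py | select_student
-- ===== SOURCE A (Python) =====
-- def select_student(students, threshold):
--     accepted = []
--     refused = []
--     for item in students:
--         if item[1] >= threshold:
--             accepted.append(item)
--         else:
--             refused.append(item)
--
--     value_item = {"Accepted": sorted(accepted, key=lambda x: x[1], reverse=True),
--                   "Refused": sorted(refused, key=lambda x: x[1])}
--     return value_item
-- ===== SOURCE B (Python) =====
-- def select_student(students, threshold):
--     # Sort-first-then-split: two stable full sorts, then filter each side.
--     by_score_desc = sorted(students, key=lambda x: x[1], reverse=True)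
--     by_score_asc = sorted(students, key=lambda x: x[1])
--     return {
--         "Accepted": [s for s in by_score_desc if s[1] >= threshold],
--         "Refused": [s for s in by_score_asc if s[1] < threshold],
--     }
-- ===== Notes on version B (the rewrite author's own statement) =====
-- stated objective: alternative
-- what changed: B drops the partition loop: it stably sorts the whole list twice (descending and ascending by score) and obtains Accepted/Refused by filtering each full sorted list, instead of A's split-first-then-sort-each-half; equal because a stable sort commutes with a score-threshold filter.
import Mathlib
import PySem

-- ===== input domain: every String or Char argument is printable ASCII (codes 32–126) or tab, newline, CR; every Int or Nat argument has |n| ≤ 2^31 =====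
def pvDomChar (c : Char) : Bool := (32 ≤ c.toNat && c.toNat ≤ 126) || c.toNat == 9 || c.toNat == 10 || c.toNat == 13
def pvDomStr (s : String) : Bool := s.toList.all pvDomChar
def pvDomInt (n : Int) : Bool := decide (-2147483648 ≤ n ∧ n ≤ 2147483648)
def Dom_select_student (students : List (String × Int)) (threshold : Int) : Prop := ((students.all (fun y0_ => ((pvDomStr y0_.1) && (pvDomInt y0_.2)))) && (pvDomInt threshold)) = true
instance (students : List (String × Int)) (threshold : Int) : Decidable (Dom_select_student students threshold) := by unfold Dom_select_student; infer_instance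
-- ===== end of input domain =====

-- B sorts the whole list twice (stable, descending and ascending) and filters each,
-- instead of A's partition-then-sort-each-half; same result, no speed claim.

-- ===== PORT A =====
def select_student (students : List (String × Int)) (threshold : Int) : List (String × List (String × Int)) :=
  -- accepted/refused built by one loop appending to one of two lists
  let s := students.foldl
    (fun (s : List (String × Int) × List (String × Int)) item =>
      if threshold ≤ item.2 then (s.1 ++ [item], s.2) else (s.1, s.2 ++ [item]))
    ([], [])
  -- dict literal with the two distinct keys, in insertion order
  [("Accepted", PySem.List.sorted s.1 (fun x => x.2) true),
   ("Refused", PySem.List.sorted s.2 (fun x => x.2))]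

-- ===== PORT B =====
def select_student_alt (students : List (String × Int)) (threshold : Int) : List (String × List (String × Int)) :=
  let by_score_desc := PySem.List.sorted students (fun x => x.2) true
  let by_score_asc := PySem.List.sorted students (fun x => x.2)
  [("Accepted", by_score_desc.filter (fun s => decide (threshold ≤ s.2))),
   ("Refused", by_score_asc.filter (fun s => decide (s.2 < threshold)))]

-- ===== PRECONDITION & SPEC =====
def Spec_select_student (students : List (String × Int)) (threshold : Int) (out : List (String × List (String × Int))) : Prop := out = select_student_alt students threshold
instance (students : List (String × Int)) (threshold : Int) (out : List (String × List (String × Int))) : Decidable (Spec_select_student students threshold out) := by unfold Spec_select_student; infer_instance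

-- ===== CLAIM (what is proved, stated in full; the proofs are below) =====
def Claim_equal_select_student : Prop := ∀ (students : List (String × Int)) (threshold : Int), Dom_select_student students threshold → Spec_select_student students threshold (select_student students threshold)

-- ===== LEMMAS AND PROOFS =====

-- filtering by a predicate closed downwards along the sort order commutes with one insertion
theorem pv_filter_insertBy {α : Type} (before : α → α → Bool) (p : α → Bool)
    (hclose : ∀ a b, p a = false → before b a = false → p b = false)
    (x : α) (l : List α) (hl : l.Pairwise (fun a b => before b a = false)) :
    List.filter p (PySem.List.insertBy before x l) =
      if p x then PySem.List.insertBy before x (List.filter p l) else List.filter p l := by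
  induction l with
  | nil =>
    by_cases hpx : p x = true <;>
      simp [PySem.List.insertBy, List.filter, hpx]
  | cons y ys ih =>
    rcases List.pairwise_cons.mp hl with ⟨hy, hys⟩
    by_cases hby : before x y = true
    · by_cases hpx : p x = true
      · by_cases hpy : p y = true
        · simp [PySem.List.insertBy, hby, List.filter, hpx, hpy]
        · have hpy' : p y = false := by simp [hpy]
          have hall : ∀ z ∈ ys, p z = false := fun z hz => hclose y z hpy' (hy z hz)
          have hnil : List.filter p ys = [] := List.filter_eq_nil_iff.mpr (by
            intro z hz; simp [hall z hz])
          simp [PySem.List.insertBy, hby, List.filter, hpx, hpy', hnil]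
      · have hpx' : p x = false := by simp [hpx]
        simp [PySem.List.insertBy, hby, List.filter, hpx']
    · have hby' : before x y = false := by simp at hby; exact hby
      by_cases hpy : p y = true
      · have := ih hys
        by_cases hpx : p x = true <;>
          simp [PySem.List.insertBy, hby', List.filter, hpy, this, hpx]
      · have hpy' : p y = false := by simp [hpy]
        have hpx' : p x = false := hclose y x hpy' hby'
        have := ih hys
        simp [PySem.List.insertBy, hby', List.filter, hpy', hpx', this]

-- inserting keeps the accumulator sorted (no later element strictly before an earlier one)
theorem pv_insertBy_pairwise {α : Type} (before : α → α → Bool)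
    (h1 : ∀ a b, before a b = true → before b a = false)
    (h2 : ∀ a b c, before b a = false → before c b = false → before c a = false)
    (x : α) (l : List α) (hl : l.Pairwise (fun a b => before b a = false)) :
    (PySem.List.insertBy before x l).Pairwise (fun a b => before b a = false) := by
  induction l with
  | nil => simp [PySem.List.insertBy]
  | cons y ys ih =>
    rcases List.pairwise_cons.mp hl with ⟨hy, hys⟩
    by_cases hby : before x y = true
    · rw [show PySem.List.insertBy before x (y :: ys) = x :: y :: ys by
        simp [PySem.List.insertBy, hby]]
      refine List.pairwise_cons.mpr ⟨?_, hl⟩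
      intro z hz
      rcases List.mem_cons.mp hz with rfl | hz'
      · exact h1 x z hby
      · exact h2 x y z (h1 x y hby) (hy z hz')
    · have hby' : before x y = false := by simp at hby; exact hby
      rw [show PySem.List.insertBy before x (y :: ys) = y :: PySem.List.insertBy before x ys by
        simp [PySem.List.insertBy, hby']]
      refine List.pairwise_cons.mpr ⟨?_, ih hys⟩
      intro z hz
      rcases (PySem.List.mem_insertBy before x z ys).mp hz with rfl | hz'
      · exact hby'
      · exact hy z hz'

-- the whole insertion-sort fold commutes with such a filter
theorem pv_foldl_insertBy_filter {α : Type} (before : α → α → Bool) (p : α → Bool)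
    (hclose : ∀ a b, p a = false → before b a = false → p b = false)
    (h1 : ∀ a b, before a b = true → before b a = false)
    (h2 : ∀ a b c, before b a = false → before c b = false → before c a = false)
    (xs : List α) :
    ∀ acc : List α, acc.Pairwise (fun a b => before b a = false) →
    List.filter p (xs.foldl (fun acc x => PySem.List.insertBy before x acc) acc) =
      (xs.filter p).foldl (fun acc x => PySem.List.insertBy before x acc) (List.filter p acc) := by
  induction xs with
  | nil => intro acc _; simp
  | cons x xs ih =>
    intro acc hacc
    have hstep := pv_filter_insertBy before p hclose x acc hacc
    have hpair := pv_insertBy_pairwise before h1 h2 x acc hacc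
    rw [List.foldl_cons, ih _ hpair, hstep, List.filter_cons]
    by_cases hpx : p x = true <;> simp [hpx]

-- stable descending sort commutes with the "score ≥ threshold" filter
theorem pv_accepted_comm (students : List (String × Int)) (threshold : Int) :
    (PySem.List.sorted students (fun x => x.2) true).filter (fun s => decide (threshold ≤ s.2)) =
      PySem.List.sorted (students.filter (fun s => decide (threshold ≤ s.2))) (fun x => x.2) true := by
  rw [PySem.List.sorted_rev_eq_foldl_insertBy, PySem.List.sorted_rev_eq_foldl_insertBy]
  have := pv_foldl_insertBy_filter
    (fun a b : String × Int => decide (b.2 < a.2)) (fun s => decide (threshold ≤ s.2))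
    (by intro a b ha hb; simp at ha hb ⊢; omega)
    (by intro a b h; simp at h ⊢; omega)
    (by intro a b c hba hcb; simp at hba hcb ⊢; omega)
    students [] (by simp)
  simpa using this

-- stable ascending sort commutes with the "score < threshold" filter
theorem pv_refused_comm (students : List (String × Int)) (threshold : Int) :
    (PySem.List.sorted students (fun x => x.2)).filter (fun s => decide (s.2 < threshold)) =
      PySem.List.sorted (students.filter (fun s => decide (s.2 < threshold))) (fun x => x.2) := by
  rw [PySem.List.sorted_eq_foldl_insertBy, PySem.List.sorted_eq_foldl_insertBy]
  have := pv_foldl_insertBy_filter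
    (fun a b : String × Int => decide (a.2 < b.2)) (fun s => decide (s.2 < threshold))
    (by intro a b ha hb; simp at ha hb ⊢; omega)
    (by intro a b h; simp at h ⊢; omega)
    (by intro a b c hba hcb; simp at hba hcb ⊢; omega)
    students [] (by simp)
  simpa using this

-- A's partition loop is two filters
theorem pv_partition_eq (students : List (String × Int)) (threshold : Int) :
    students.foldl
      (fun (s : List (String × Int) × List (String × Int)) item =>
        if threshold ≤ item.2 then (s.1 ++ [item], s.2) else (s.1, s.2 ++ [item]))
      ([], []) =
      (students.filter (fun s => decide (threshold ≤ s.2)),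
       students.filter (fun s => decide (s.2 < threshold))) := by
  have hfun : (fun (s : List (String × Int) × List (String × Int)) item =>
      if threshold ≤ item.2 then (s.1 ++ [item], s.2) else (s.1, s.2 ++ [item])) =
      (fun s item =>
        (if threshold ≤ item.2 then s.1 ++ [item] else s.1,
         if item.2 < threshold then s.2 ++ [item] else s.2)) := by
    funext s item
    by_cases h : threshold ≤ item.2
    · have h2 : ¬ item.2 < threshold := by omega
      simp [h, h2]
    · have h2 : item.2 < threshold := by omega
      simp [h, h2]
  rw [hfun, PySem.List.foldl_prod_mk
    (f := fun (a : List (String × Int)) (e : String × Int) => if threshold ≤ e.2 then a ++ [e] else a)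
    (g := fun (b : List (String × Int)) (e : String × Int) => if e.2 < threshold then b ++ [e] else b)]
  rw [PySem.List.foldl_append_ite_eq_filter, PySem.List.foldl_append_ite_eq_filter]
  simp

-- ===== VERDICT (by name: the statement is the Claim_ definition above) =====
theorem select_student_spec : Claim_equal_select_student := by
  intro students threshold _
  unfold Spec_select_student select_student select_student_alt
  simp only [pv_partition_eq]
  rw [pv_accepted_comm, pv_refused_comm]
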